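-- pv_equiv track=rewrite | github.com/luisrnandezc/performance-cessna-172 | src/data.py | valid_takeoff_temp
-- ===== SOURCE A (Python) =====
-- def valid_takeoff_temp(takeoff_temp):
--     """Returns the corrected takeoff temperature."""
--     valid_temperatures = list(range(0, 50, 10))
--     min_temp = valid_temperatures[0]
--     if takeoff_temp < min_temp:
--         return min_temp
--     for valid_temp in valid_temperatures:
--         if takeoff_temp == valid_temp:
--             return takeoff_temp
--         elif takeoff_temp >= valid_temp + 4:
--             continue
--         else:
--             return valid_temp
-- ===== SOURCE B (Python) =====
-- def valid_takeoff_temp(takeoff_temp):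
--     """Returns the corrected takeoff temperature (closed-form snap)."""
--     if takeoff_temp < 0:
--         return 0
--     if takeoff_temp >= 44:
--         return None
--     return (takeoff_temp + 6) // 10 * 10
-- ===== Notes on version B (the rewrite author's own statement) =====
-- stated objective: simpler
-- what changed: Replaces the scan over the five-element valid-temperature list with a closed-form arithmetic snap (shifted floor to the nearest valid step) behind two range guards.
-- outside the precondition, e.g. on valid_takeoff_temp(44): A returns None, B returns None
import Mathlib
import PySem

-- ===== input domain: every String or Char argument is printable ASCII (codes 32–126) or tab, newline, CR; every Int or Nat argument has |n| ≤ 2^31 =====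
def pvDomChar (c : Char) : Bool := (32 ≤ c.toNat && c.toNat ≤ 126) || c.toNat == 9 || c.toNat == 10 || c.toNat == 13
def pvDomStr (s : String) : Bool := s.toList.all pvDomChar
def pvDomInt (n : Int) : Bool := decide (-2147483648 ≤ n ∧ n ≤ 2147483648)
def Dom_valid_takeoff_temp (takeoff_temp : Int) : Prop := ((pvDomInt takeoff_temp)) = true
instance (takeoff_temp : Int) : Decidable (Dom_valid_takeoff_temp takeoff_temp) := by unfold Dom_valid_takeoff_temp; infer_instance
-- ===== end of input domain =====

-- ===== PORT A =====
-- B replaces A's scan over the valid-temperature list with a closed-form arithmetic snap (objective: simpler).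
-- loop of A: for valid_temp in valid_temperatures: …  (falls off the end, i.e. Python returns None, only when takeoff_temp ≥ 44, excluded by Pre_; the port returns 0 there)
def vttLoop (takeoff_temp : Int) : List Int → Int
  | [] => 0
  | v :: rest =>
    if takeoff_temp = v then takeoff_temp
    else if takeoff_temp ≥ v + 4 then vttLoop takeoff_temp rest
    else v

def valid_takeoff_temp (takeoff_temp : Int) : Int :=
  let valid_temperatures : List Int := PySem.List.pyRange 0 50 10
  let min_temp := valid_temperatures.headD 0   -- valid_temperatures[0]; list is nonempty
  if takeoff_temp < min_temp then min_temp
  else vttLoop takeoff_temp valid_temperatures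

-- ===== PORT B =====
def valid_takeoff_temp_alt (takeoff_temp : Int) : Int :=
  if takeoff_temp < 0 then 0
  else if takeoff_temp ≥ 44 then 0   -- Source B returns None here; outside Pre_, port returns 0
  else PySem.Int.floordiv (takeoff_temp + 6) 10 * 10

-- ===== PRECONDITION & SPEC =====
-- Pre_ excludes takeoff_temp ≥ 44, where Python A falls off the loop and returns None (not an int).
def Pre_valid_takeoff_temp (takeoff_temp : Int) : Prop := takeoff_temp < 44
instance (takeoff_temp : Int) : Decidable (Pre_valid_takeoff_temp takeoff_temp) := by unfold Pre_valid_takeoff_temp; infer_instance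
def pvWitness_valid_takeoff_temp : Int := (17)
def Spec_valid_takeoff_temp (takeoff_temp : Int) (out : Int) : Prop := out = valid_takeoff_temp_alt takeoff_temp
instance (takeoff_temp : Int) (out : Int) : Decidable (Spec_valid_takeoff_temp takeoff_temp out) := by unfold Spec_valid_takeoff_temp; infer_instance

-- ===== CLAIM (what is proved, stated in full; the proofs are below) =====
def Claim_equal_valid_takeoff_temp : Prop := ∀ (takeoff_temp : Int), Dom_valid_takeoff_temp takeoff_temp → Pre_valid_takeoff_temp takeoff_temp → Spec_valid_takeoff_temp takeoff_temp (valid_takeoff_temp takeoff_temp)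

-- ===== LEMMAS AND PROOFS =====

-- ===== VERDICT (by name: the statement is the Claim_ definition above) =====
theorem valid_takeoff_temp_spec : Claim_equal_valid_takeoff_temp := by
  intro t _ hpre
  unfold Pre_valid_takeoff_temp at hpre
  unfold Spec_valid_takeoff_temp valid_takeoff_temp valid_takeoff_temp_alt
  rw [show PySem.List.pyRange 0 50 10 = ([0, 10, 20, 30, 40] : List Int) from by decide]
  by_cases h0 : t < 0
  · simp [h0]
  · have h0' : 0 ≤ t := by omega
    rw [PySem.Int.floordiv_eq_ediv_of_pos (by norm_num)]
    interval_cases t <;> decide
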